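-- pv_equiv track=rewrite | github.com/dataO1/helix-query-tool | src/helix_indexer.py | _chunk_config
-- ===== SOURCE A (Python) =====
-- from typing import List, Dict, Any, Optional
--
-- def _chunk_config(content: str) -> List[str]:
--     """Chunk configuration files by sections"""
--     lines = content.splitlines()
--     chunks = []
--     current_chunk = []
--
--     for line in lines:
--         stripped = line.strip()
--         # New section (starts at column 0, not empty, not comment)
--         if stripped and not line.startswith(' ') and not line.startswith('#'):
--             if current_chunk:
--                 chunks.append('\n'.join(current_chunk))
--                 current_chunk = []
--         current_chunk.append(line)
--
--     if current_chunk: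
--         chunks.append('\n'.join(current_chunk))
--
--     return [chunk for chunk in chunks if chunk.strip()]
-- ===== SOURCE B (Python) =====
-- from typing import List
--
--
-- def _is_header(line: str) -> bool:
--     return bool(line.strip()) and not line.startswith(' ') and not line.startswith('#')
--
--
-- def _chunk_config(content: str) -> List[str]:
--     """Chunk configuration files by sections (span decomposition)."""
--     lines = content.splitlines()
--     groups = []
--     i = 0
--     n = len(lines)
--     while i < n:
--         j = i + 1
--         while j < n and not _is_header(lines[j]):
--             j += 1
--         groups.append('\n'.join(lines[i:j]))
--         i = j
--     return [g for g in groups if g.strip()]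
-- ===== Notes on version B (the rewrite author's own statement) =====
-- stated objective: alternative
-- what changed: Replaces A's single accumulator-and-flush loop (build current_chunk, flush on each header line) with a span decomposition: repeatedly take a head line plus the following run of non-header lines as one group, joining each slice directly.
import Mathlib
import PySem

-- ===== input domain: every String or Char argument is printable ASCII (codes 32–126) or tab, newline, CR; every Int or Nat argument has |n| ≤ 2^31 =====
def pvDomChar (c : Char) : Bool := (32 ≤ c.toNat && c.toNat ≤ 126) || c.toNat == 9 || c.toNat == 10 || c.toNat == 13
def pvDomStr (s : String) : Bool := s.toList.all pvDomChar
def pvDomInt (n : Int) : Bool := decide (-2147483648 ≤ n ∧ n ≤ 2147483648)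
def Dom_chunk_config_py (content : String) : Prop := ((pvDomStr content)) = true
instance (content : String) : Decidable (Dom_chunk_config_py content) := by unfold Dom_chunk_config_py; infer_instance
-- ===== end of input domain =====

-- B replaces A's accumulator-and-flush loop by a span decomposition (group = head line plus
-- following non-header lines), same cost; equivalence of the two structures is proved below.

-- ===== PORT A =====
-- the header test 'stripped and not line.startswith(' ') and not line.startswith('#')'
def pvHeaderTest (stripped line : String) : Bool :=
  decide (stripped ≠ "") && !(PySem.Str.startswith line " ") && !(PySem.Str.startswith line "#")

-- one iteration of A's for-loop over the state (chunks, current_chunk)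
def pvStepA (st : List String × List String) (line : String) : List String × List String :=
  let stripped := PySem.Str.strip line
  let st' :=
    if pvHeaderTest stripped line then
      (if st.2 ≠ [] then (st.1 ++ [PySem.Str.join "\n" st.2], ([] : List String)) else st)
    else st
  (st'.1, st'.2 ++ [line])

-- the final 'if current_chunk: chunks.append(...)'
def pvFinish (st : List String × List String) : List String :=
  if st.2 ≠ [] then st.1 ++ [PySem.Str.join "\n" st.2] else st.1

def chunk_config_py (content : String) : List String :=
  let lines := PySem.Str.splitlines content
  let chunks := pvFinish (lines.foldl pvStepA (([] : List String), ([] : List String)))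
  chunks.filter (fun chunk => decide (PySem.Str.strip chunk ≠ ""))

-- ===== PORT B =====
def pvIsHeader (line : String) : Bool :=
  decide (PySem.Str.strip line ≠ "") && !(PySem.Str.startswith line " ") && !(PySem.Str.startswith line "#")

-- Source B's outer while-loop as the obvious structural recursion on the remaining suffix;
-- the inner index scan j is takeWhile/dropWhile, and lines[i:j] joined is the group.
def pvGroupsB : List String → List String
  | [] => []
  | l :: rest =>
    PySem.Str.join "\n" (l :: rest.takeWhile (fun x => !pvIsHeader x)) ::
      pvGroupsB (rest.dropWhile (fun x => !pvIsHeader x))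
termination_by ls => ls.length
decreasing_by
  simpa [Nat.lt_succ_iff] using List.length_dropWhile_le (fun x => !pvIsHeader x) rest

def chunk_config_py_alt (content : String) : List String :=
  (pvGroupsB (PySem.Str.splitlines content)).filter (fun g => decide (PySem.Str.strip g ≠ ""))

-- ===== PRECONDITION & SPEC =====
def Spec_chunk_config_py (content : String) (out : List String) : Prop := out = chunk_config_py_alt content
instance (content : String) (out : List String) : Decidable (Spec_chunk_config_py content out) := by unfold Spec_chunk_config_py; infer_instance

-- ===== CLAIM (what is proved, stated in full; the proofs are below) =====
def Claim_equal_chunk_config_py : Prop := ∀ (content : String), Dom_chunk_config_py content → Spec_chunk_config_py content (chunk_config_py content)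

-- ===== LEMMAS AND PROOFS =====

theorem pvGroupsB_nil : pvGroupsB [] = [] := by rw [pvGroupsB]

theorem pvGroupsB_cons (l : String) (rest : List String) :
    pvGroupsB (l :: rest) =
      PySem.Str.join "\n" (l :: rest.takeWhile (fun x => !pvIsHeader x)) ::
        pvGroupsB (rest.dropWhile (fun x => !pvIsHeader x)) := by rw [pvGroupsB]

-- A's header test, applied to the stripped line, is B's header test (definitionally)
theorem pvHeaderTest_eq (l : String) : pvHeaderTest (PySem.Str.strip l) l = pvIsHeader l := rfl

-- the loop invariant: running A's loop from (chunks, cur) with cur ≠ [] and then flushing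
-- yields chunks ++ the groups of the remaining lines, the first group opened by cur
theorem pvFoldA_groups (ls : List String) : ∀ (chunks cur : List String), cur ≠ [] →
    pvFinish (ls.foldl pvStepA (chunks, cur)) =
    chunks ++ (PySem.Str.join "\n" (cur ++ ls.takeWhile (fun x => !pvIsHeader x)) ::
      pvGroupsB (ls.dropWhile (fun x => !pvIsHeader x))) := by
  induction ls with
  | nil => intro chunks cur hc; simp [pvFinish, pvGroupsB_nil, hc]
  | cons l rest ih =>
    intro chunks cur hc
    by_cases h : pvIsHeader l = true
    · have hstep : pvStepA (chunks, cur) l = (chunks ++ [PySem.Str.join "\n" cur], [l]) := by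
        simp [pvStepA, pvHeaderTest_eq, h, hc]
      rw [List.foldl_cons, hstep, ih (chunks ++ [PySem.Str.join "\n" cur]) [l] (by simp)]
      simp [h, pvGroupsB_cons]
    · have hb : pvIsHeader l = false := by simpa using h
      have hstep : pvStepA (chunks, cur) l = (chunks, cur ++ [l]) := by
        simp [pvStepA, pvHeaderTest_eq, hb]
      rw [List.foldl_cons, hstep, ih chunks (cur ++ [l]) (by simp)]
      simp [hb]

theorem pvMain (ls : List String) :
    pvFinish (ls.foldl pvStepA ([], [])) = pvGroupsB ls := by
  cases ls with
  | nil => simp [pvFinish, pvGroupsB_nil]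
  | cons l rest =>
    have hstep : pvStepA ([], []) l = ([], [l]) := by simp [pvStepA]
    rw [List.foldl_cons, hstep, pvFoldA_groups rest [] [l] (by simp), pvGroupsB_cons]
    simp

-- ===== VERDICT (by name: the statement is the Claim_ definition above) =====
theorem chunk_config_py_spec : Claim_equal_chunk_config_py := by
  intro content _
  unfold Spec_chunk_config_py
  simp only [chunk_config_py, chunk_config_py_alt]
  rw [pvMain]
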